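-- pv_equiv track=rewrite | github.com/mrbartrns/absolutecoding | BOJ_math1/BOJ_2775.py | solve
-- ===== SOURCE A (Python) =====
-- def solve(level, width):
--     sum1 = 1
--     sum2 = 1
--     num = 0
--     flag = True
--     lst1 = [1]
--     lst2 = [1]
--     for i in range(1, width): #맨 처음 호까지의 리스트를 만듬, 0층
--         i += 1
--         lst1.append(i)
-- #리스트의 값을 더하고 새로운 리스트에 추가:1층 이상, 홀수층: lst2, 짝수층 : lst1
--     else:
--         while flag:
--             num += 1
--             for j in range(1, len(lst1)):
--                 sum1 += lst1[j]
--                 lst2.append(sum1)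
--             lst1 = [1]
--             sum1 = 1
--             if num == level:
--                 flag = False
--                 return lst2[width - 1]
--             else:
--                 num += 1
--                 for j in range(1, len(lst2)):
--                     sum2 += lst2[j]
--                     lst1.append(sum2)
--                 lst2 = [1]
--                 sum2 = 1
--                 if num == level:
--                     flag = False
--                     return lst1[width - 1]
-- ===== SOURCE B (Python) =====
-- def solve(level, width):
--     # answer = C(width + level, level + 1), exact multiplicative binomial formula
--     n = width + level
--     k = level + 1
--     num = 1
--     for i in range(1, k + 1):
--         num = num * (n - k + i) // i
--     return num
-- ===== Notes on version B (the rewrite author's own statement) =====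
-- stated objective: faster
-- what changed: Replaces the row-by-row rebuilding of every floor's occupant list with the closed-form binomial C(width+level, level+1), computed by the exact multiplicative formula in one short loop.
-- outside the precondition, e.g. on solve(2, 0): A returns 1, B returns 0
import Mathlib
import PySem

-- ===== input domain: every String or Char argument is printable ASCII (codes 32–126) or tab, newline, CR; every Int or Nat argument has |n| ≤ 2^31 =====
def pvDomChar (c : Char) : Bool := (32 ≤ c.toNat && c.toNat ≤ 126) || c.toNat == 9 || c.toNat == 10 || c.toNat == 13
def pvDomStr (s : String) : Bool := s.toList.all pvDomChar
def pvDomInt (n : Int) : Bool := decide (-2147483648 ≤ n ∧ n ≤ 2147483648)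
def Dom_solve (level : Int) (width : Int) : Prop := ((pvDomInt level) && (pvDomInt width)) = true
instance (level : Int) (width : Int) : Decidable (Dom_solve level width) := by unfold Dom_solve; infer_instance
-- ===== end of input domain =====

-- B replaces A's floor-by-floor rebuilding of occupant lists with the closed-form
-- binomial C(width+level, level+1) computed by the exact multiplicative formula (faster).


-- ===== PORT A =====
-- one half of A's while-body: sum = 1; out = [1]; for j in range(1, len(src)): sum += src[j]; out.append(sum)
-- (src[j] is ported as pyGetD src j 0; j is always in range here)
def solveRow (src : List Int) : List Int :=
  ((PySem.List.pyRange 1 (src.length : Int) 1).foldl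
    (fun (st : Int × List Int) j =>
      (st.1 + PySem.List.pyGetD src j 0, st.2 ++ [st.1 + PySem.List.pyGetD src j 0]))
    (1, [1])).2

-- A's 'while flag' loop; each pass does the two halves of the body.  At every loop top lst2 = [1]
-- (it is reset right after being consumed), so only lst1 is carried.  The fuel level.toNat bounds
-- the number of passes (each pass advances num by 2 and A returns when num = level); fuel 0 is
-- reached only when the Python loops forever (level ≤ 0), which Pre_ excludes.
def solveLoop (fuel : Nat) (lst1 : List Int) (num level width : Int) : Int :=
  match fuel with
  | 0 => 0
  | fuel + 1 =>
    let num1 := num + 1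
    let lst2 := solveRow lst1
    if num1 = level then PySem.List.pyGetD lst2 (width - 1) 0
    else
      let num2 := num1 + 1
      let lst1' := solveRow lst2
      if num2 = level then PySem.List.pyGetD lst1' (width - 1) 0
      else solveLoop fuel lst1' num2 level width

def solve (level : Int) (width : Int) : Int :=
  -- for i in range(1, width): i += 1; lst1.append(i)
  let lst1 := (PySem.List.pyRange 1 width 1).foldl (fun l i => l ++ [i + 1]) [1]
  solveLoop level.toNat lst1 0 level width

-- ===== PORT B =====
def solve_alt (level : Int) (width : Int) : Int :=
  let n := width + level
  let k := level + 1
  (PySem.List.pyRange 1 (k + 1) 1).foldl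
    (fun num i => PySem.Int.floordiv (num * (n - k + i)) i) 1

-- ===== PRECONDITION & SPEC =====
-- Pre_ excludes level ≤ 0, where A loops forever, and width ≤ 0, where A either raises
-- IndexError or (for width = 0) returns the last room via Python's negative-index wraparound,
-- an artefact of the implementation.
def Pre_solve (level : Int) (width : Int) : Prop := 1 ≤ level ∧ 1 ≤ width
instance (level : Int) (width : Int) : Decidable (Pre_solve level width) := by unfold Pre_solve; infer_instance
def pvWitness_solve : Int × Int := (3, 4)

def Spec_solve (level : Int) (width : Int) (out : Int) : Prop := out = solve_alt level width
instance (level : Int) (width : Int) (out : Int) : Decidable (Spec_solve level width out) := by unfold Spec_solve; infer_instance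

-- ===== CLAIM (what is proved, stated in full; the proofs are below) =====
def Claim_equal_solve : Prop := ∀ (level : Int) (width : Int), Dom_solve level width → Pre_solve level width → Spec_solve level width (solve level width)

-- ===== LEMMAS AND PROOFS =====

-- occupant count of room j (1-based) on floor m: g m j = C(j+m, m+1)
def pvG (m j : Nat) : Nat := Nat.choose (j + m) (m + 1)

-- floor m as A's list of width W
def pvRow (m W : Nat) : List Int := (List.range W).map (fun j => (pvG m (j + 1) : Int))

-- the initial lst1 is floor 0
theorem solve_init_row (width : Int) (h : 1 ≤ width) :
    (PySem.List.pyRange 1 width 1).foldl (fun l i => l ++ [i + 1]) [1] = pvRow 0 width.toNat := by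
  rw [PySem.List.pyRange_one, PySem.List.foldl_append_singleton_eq_map]
  have hW : width.toNat = (width.toNat - 1) + 1 := by omega
  rw [pvRow, hW, List.range_succ_eq_map]
  have hc : ((width - 1).toNat) = width.toNat - 1 := by omega
  simp [pvG, hc, Function.comp_def]
  intro a ha; ring

-- the inner fold computes the prefix sums (hockey-stick identity)
theorem pvFold_prefix (m : Nat) : ∀ (t : Nat),
    ((List.range t).map (fun j => (pvG m (j + 2) : Int))).foldl
      (fun (st : Int × List Int) x => (st.1 + x, st.2 ++ [st.1 + x])) (1, [1])
    = ((pvG (m + 1) (t + 1) : Int), (List.range (t + 1)).map (fun j => (pvG (m + 1) (j + 1) : Int))) := by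
  intro t
  induction t with
  | zero => simp [pvG, show ∀ m : Nat, 1 + (m + 1) = m + 1 + 1 from fun m => by omega, Nat.choose_self]
  | succ t ih =>
    rw [List.range_succ, List.map_append, List.foldl_append, ih]
    simp only [List.map_cons, List.map_nil, List.foldl_cons, List.foldl_nil, Prod.mk.injEq]
    have key : pvG (m + 1) (t + 1) + pvG m (t + 2) = pvG (m + 1) (t + 1 + 1) := by
      simp only [pvG]
      have h := Nat.choose_succ_succ (t + m + 2) (m + 1)
      have e1 : t + 1 + (m + 1) = t + m + 2 := by omega
      have e2 : t + 2 + m = t + m + 2 := by omega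
      have e3 : t + 1 + 1 + (m + 1) = t + m + 2 + 1 := by omega
      simp only [Nat.succ_eq_add_one] at h
      rw [e1, e2, e3, h]
      omega
    constructor
    · push_cast [← key]; ring
    · rw [show List.range (t + 1 + 1) = List.range (t + 1) ++ [t + 1] from List.range_succ,
          List.map_append]
      simp only [List.map_cons, List.map_nil]
      rw [← key]
      push_cast
      simp

-- one half of A's body maps floor m to floor m+1
theorem solveRow_row (m W : Nat) (hW : 1 ≤ W) : solveRow (pvRow m W) = pvRow (m + 1) W := by
  unfold solveRow
  rw [PySem.List.foldl_pyRange_pyGetD' (pvRow m W) 0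
        (fun (st : Int × List Int) x => (st.1 + x, st.2 ++ [st.1 + x])) (1, [1]) (a := 1) (by norm_num)]
  have hW' : W = (W - 1) + 1 := by omega
  have hdrop : (pvRow m W).drop 1 = (List.range (W - 1)).map (fun j => (pvG m (j + 2) : Int)) := by
    rw [pvRow, hW', List.range_succ_eq_map]
    simp [Function.comp_def]
  rw [show (1 : Int).toNat = 1 from rfl, hdrop, pvFold_prefix m (W - 1)]
  rw [pvRow, hW']
  simp

-- reading room `width` of floor m
theorem row_get (m W : Nat) (width : Int) (hw : width = (W : Int)) (hW : 1 ≤ W) :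
    PySem.List.pyGetD (pvRow m W) (width - 1) 0 = (pvG m W : Int) := by
  have h1 : width - 1 = ((W - 1 : Nat) : Int) := by omega
  rw [h1, PySem.List.pyGetD_natCast]
  rw [List.getD_eq_getElem?_getD, pvRow]
  rw [List.getElem?_map]
  have : (W - 1) < W := by omega
  simp [List.getElem?_range this]
  congr 1
  omega

-- the while loop returns room `width` of floor `level`
theorem solveLoop_eval (level width : Int) (W : Nat) (hw : width = (W : Int)) (hW : 1 ≤ W) :
    ∀ (fuel m : Nat), (m : Int) < level → level ≤ (m : Int) + 2 * fuel →
    solveLoop fuel (pvRow m W) m level width = (pvG level.toNat W : Int) := by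
  intro fuel
  induction fuel with
  | zero => intro m h1 h2; omega
  | succ fuel ih =>
    intro m h1 h2
    rw [solveLoop]
    simp only [solveRow_row m W hW]
    by_cases hcase : (m : Int) + 1 = level
    · rw [if_pos hcase]
      rw [row_get (m + 1) W width hw hW]
      congr 2
      omega
    · rw [if_neg hcase]
      rw [solveRow_row (m + 1) W hW]
      by_cases hcase2 : (m : Int) + 1 + 1 = level
      · rw [if_pos hcase2]
        rw [row_get (m + 2) W width hw hW]
        congr 2
        omega
      · rw [if_neg hcase2]
        have := ih (m + 2) (by push_cast; omega) (by push_cast; push_cast at h2; omega)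
        push_cast at this ⊢
        rw [show ((m : Int) + 1 + 1) = ((m : Int) + 2) by ring]
        exact this

-- A computes the binomial
theorem solve_eq_choose (level width : Int) (hl : 1 ≤ level) (hw : 1 ≤ width) :
    solve level width = (Nat.choose (width.toNat + level.toNat) (level.toNat + 1) : Int) := by
  unfold solve
  rw [solve_init_row width hw]
  have := solveLoop_eval level width width.toNat (by omega) (by omega) level.toNat 0
    (by push_cast; omega) (by push_cast; omega)
  simpa [pvG] using this

-- B's multiplicative loop: invariant after t steps
theorem alt_fold (W : Nat) (hW : 1 ≤ W) : ∀ (t : Nat),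
    ((List.range t).map (fun j : Nat => (1 : Int) + ↑j)).foldl
      (fun num i => PySem.Int.floordiv (num * (((W : Int) - 1) + i)) i) 1
    = (Nat.choose (W - 1 + t) t : Int) := by
  intro t
  induction t with
  | zero => simp
  | succ t ih =>
    rw [List.range_succ, List.map_append, List.foldl_append, ih]
    simp only [List.map_cons, List.map_nil, List.foldl_cons, List.foldl_nil]
    have harg : ((W : Int) - 1) + ((1 : Int) + ↑t) = ((W + t : Nat) : Int) := by push_cast; omega
    have hnum : (Nat.choose (W - 1 + t) t : Int) * ((W + t : Nat) : Int)
        = ((Nat.choose (W - 1 + t) t * (W + t) : Nat) : Int) := by push_cast; ring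
    rw [harg, hnum]
    have hid : Nat.choose (W - 1 + t) t * (W + t) = Nat.choose (W + t) (t + 1) * (t + 1) := by
      have h := Nat.add_one_mul_choose_eq (W - 1 + t) t
      have hWt : W - 1 + t + 1 = W + t := by omega
      rw [hWt] at h
      rw [Nat.mul_comm]
      exact h
    rw [hid]
    have h1t : ((1 : Int) + ↑t) = ((t + 1 : Nat) : Int) := by push_cast; ring
    rw [h1t, PySem.Int.floordiv_natCast, Nat.mul_div_cancel _ (by omega)]
    congr 2
    omega

theorem solve_alt_eq_choose (level width : Int) (hl : 1 ≤ level) (hw : 1 ≤ width) :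
    solve_alt level width = (Nat.choose (width.toNat + level.toNat) (level.toNat + 1) : Int) := by
  show (PySem.List.pyRange 1 ((level + 1) + 1) 1).foldl
      (fun num i => PySem.Int.floordiv (num * ((width + level) - (level + 1) + i)) i) 1
    = (Nat.choose (width.toNat + level.toNat) (level.toNat + 1) : Int)
  rw [PySem.List.pyRange_one]
  have hk : ((level + 1 + 1 - 1).toNat) = level.toNat + 1 := by omega
  have hfun : (fun (num i : Int) => PySem.Int.floordiv (num * (width + level - (level + 1) + i)) i)
      = (fun num i => PySem.Int.floordiv (num * (((width.toNat : Int)) - 1 + i)) i) := by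
    funext num i; congr 2; omega
  rw [hk, hfun, alt_fold width.toNat (by omega) (level.toNat + 1)]
  have e : width.toNat - 1 + (level.toNat + 1) = width.toNat + level.toNat := by omega
  rw [e]

-- ===== VERDICT (by name: the statement is the Claim_ definition above) =====
theorem solve_spec : Claim_equal_solve := by
  intro level width _ hpre
  unfold Spec_solve
  rw [solve_eq_choose level width hpre.1 hpre.2, solve_alt_eq_choose level width hpre.1 hpre.2]
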